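-- pv_equiv track=rewrite | github.com/mmartin-sub/libriscribe | src/libriscribe2/agents/outliner.py | _split_into_scene_sections
-- ===== SOURCE A (Python) =====
-- def _split_into_scene_sections(scene_outline_md: str) -> list[str]:
--     """Split the scene outline into sections for each scene."""
--     # First, normalize line endings and clean up the text
--     scene_outline_md = scene_outline_md.replace("\r\n", "\n").replace("\r", "\n")
--     lines = scene_outline_md.split("\n")
--
--     scene_sections = []
--     current_section: list[str] = []
--     is_in_scene = False
--
--     for line in lines:
--         line = line.strip()
--         if not line:
--             continue
--
--         # Detect new scene headers
--         if "Scene" in line and (":" in line or line.strip().startswith("Scene")):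
--             # If we were already in a scene, save it
--             if is_in_scene and current_section:
--                 scene_sections.append("\n".join(current_section))
--                 current_section = []
--
--             is_in_scene = True
--             current_section.append(line)
--         elif is_in_scene:
--             current_section.append(line)
--
--     # Don't forget to add the last scene
--     if current_section:
--         scene_sections.append("\n".join(current_section))
--
--     return scene_sections
-- ===== SOURCE B (Python) =====
-- def _split_into_scene_sections(scene_outline_md: str) -> list[str]:
--     """Split the scene outline into sections for each scene.
--
--     Strategy: clean the lines first, then build the sections back-to-front
--     with a reverse sweep (lines accumulate until a header closes a section;
--     lines before the first header are naturally discarded)."""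
--     text = scene_outline_md.replace("\r\n", "\n").replace("\r", "\n")
--     cleaned = [s for s in (raw.strip() for raw in text.split("\n")) if s]
--
--     def is_header(line: str) -> bool:
--         return "Scene" in line and (":" in line or line.strip().startswith("Scene"))
--
--     sections: list[str] = []
--     tail: list[str] = []
--     for line in reversed(cleaned):
--         if is_header(line):
--             sections.append("\n".join([line] + tail))
--             tail = []
--         else:
--             tail = [line] + tail
--     sections.reverse()
--     return sections
-- ===== Notes on version B (the rewrite author's own statement) =====
-- stated objective: alternative
-- what changed: Replaces the stateful is_in_scene flag parser over raw lines with a clean-first pipeline plus a reverse sweep that builds sections back-to-front, closing a section at each header so no flag or final flush is needed.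
import Mathlib
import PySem

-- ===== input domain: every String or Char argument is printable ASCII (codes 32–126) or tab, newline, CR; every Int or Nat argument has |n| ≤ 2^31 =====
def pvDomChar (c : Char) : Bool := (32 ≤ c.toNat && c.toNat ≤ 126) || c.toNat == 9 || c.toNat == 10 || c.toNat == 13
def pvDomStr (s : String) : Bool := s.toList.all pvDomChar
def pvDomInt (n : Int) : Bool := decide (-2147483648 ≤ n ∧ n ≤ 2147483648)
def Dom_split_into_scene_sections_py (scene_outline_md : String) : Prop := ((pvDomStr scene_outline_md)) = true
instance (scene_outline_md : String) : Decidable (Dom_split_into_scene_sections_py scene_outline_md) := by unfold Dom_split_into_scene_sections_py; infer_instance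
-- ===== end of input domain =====

-- B replaces A's flag-driven stream parser with a clean-the-lines-first pass plus a reverse
-- (back-to-front) sweep that closes a section at each header; same O(n) cost, different shape.


-- shared header predicate: '"Scene" in line and (":" in line or line.strip().startswith("Scene"))'
def pvHeader (line : String) : Bool :=
  PySem.Str.isIn "Scene" line &&
    (PySem.Str.isIn ":" line || PySem.Str.startswith (PySem.Str.strip line) "Scene")

-- ===== PORT A =====
-- A's loop body after the strip/skip: state = (scene_sections, current_section, is_in_scene)
def pvStepC (st : List String × List String × Bool) (line : String) :
    List String × List String × Bool :=
  if pvHeader line then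
    if st.2.2 = true ∧ st.2.1 ≠ [] then
      (st.1 ++ [PySem.Str.join "\n" st.2.1], ([line], true))
    else (st.1, (st.2.1 ++ [line], true))
  else if st.2.2 then (st.1, (st.2.1 ++ [line], st.2.2)) else st

-- A's full loop body: 'line = line.strip(); if not line: continue; …'
def pvStepA (st : List String × List String × Bool) (raw : String) :
    List String × List String × Bool :=
  let line := PySem.Str.strip raw
  if line = "" then st else pvStepC st line

-- the final 'if current_section: scene_sections.append("\n".join(current_section))'
def pvFin (st : List String × List String × Bool) : List String :=
  if st.2.1 ≠ [] then st.1 ++ [PySem.Str.join "\n" st.2.1] else st.1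

def split_into_scene_sections_py (scene_outline_md : String) : List String :=
  let text := PySem.Str.replace (PySem.Str.replace scene_outline_md "\r\n" "\n") "\r" "\n"
  let lines := (PySem.Str.split? text "\n").getD []   -- sep "\n" ≠ "": split? is always some here
  pvFin (lines.foldl pvStepA (([], [], false) : List String × List String × Bool))

-- ===== PORT B =====
-- Source B's reverse sweep: state = (sections-built-so-far, tail of lines up to the next header);
-- 'for line in reversed(cleaned)' with the final reverse is List.foldr.
def pvStepB (line : String) (st : List String × List String) : List String × List String :=
  if pvHeader line then (PySem.Str.join "\n" (line :: st.2) :: st.1, ([] : List String))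
  else (st.1, line :: st.2)

def split_into_scene_sections_py_alt (scene_outline_md : String) : List String :=
  let text := PySem.Str.replace (PySem.Str.replace scene_outline_md "\r\n" "\n") "\r" "\n"
  let cleaned := (((PySem.Str.split? text "\n").getD []).map PySem.Str.strip).filter
    (fun s => s ≠ "")
  (cleaned.foldr pvStepB ([], [])).1

-- ===== PRECONDITION & SPEC =====
def Spec_split_into_scene_sections_py (scene_outline_md : String) (out : List String) : Prop := out = split_into_scene_sections_py_alt scene_outline_md
instance (scene_outline_md : String) (out : List String) : Decidable (Spec_split_into_scene_sections_py scene_outline_md out) := by unfold Spec_split_into_scene_sections_py; infer_instance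

-- ===== CLAIM (what is proved, stated in full; the proofs are below) =====
def Claim_equal_split_into_scene_sections_py : Prop := ∀ (scene_outline_md : String), Dom_split_into_scene_sections_py scene_outline_md → Spec_split_into_scene_sections_py scene_outline_md (split_into_scene_sections_py scene_outline_md)

-- ===== LEMMAS AND PROOFS =====

-- reference shape of the result, computed from the cleaned line list:
-- gsec cur ls = the sections produced when already inside a scene with accumulated 'cur' (≠ [])
def gsec : List String → List String → List String
  | cur, [] => [PySem.Str.join "\n" cur]
  | cur, l :: ls =>
      if pvHeader l then PySem.Str.join "\n" cur :: gsec [l] ls else gsec (cur ++ [l]) ls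

-- fsec ls = the sections produced before the first header has been seen
def fsec : List String → List String
  | [] => []
  | l :: ls => if pvHeader l then gsec [l] ls else fsec ls

-- A's raw-line loop is the cleaned-line loop
theorem foldl_stepA_eq (lines : List String) (st : List String × List String × Bool) :
    lines.foldl pvStepA st =
      ((lines.map PySem.Str.strip).filter (fun s => s ≠ "")).foldl pvStepC st := by
  induction lines generalizing st with
  | nil => rfl
  | cons l ls ih =>
      by_cases h : PySem.Str.strip l = "" <;>
        simp [pvStepA, h, ih]

-- A's loop, already inside a scene
theorem foldl_stepC_in (ls : List String) (secs cur : List String) (hc : cur ≠ []) :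
    pvFin (ls.foldl pvStepC (secs, cur, true)) = secs ++ gsec cur ls := by
  induction ls generalizing secs cur with
  | nil => simp [pvFin, gsec, hc]
  | cons l ls ih =>
      by_cases h : pvHeader l
      · have hs : pvStepC (secs, cur, true) l =
            (secs ++ [PySem.Str.join "\n" cur], ([l], true)) := by
          simp [pvStepC, h, hc]
        rw [List.foldl_cons, hs, ih _ _ (by simp)]
        simp [gsec, h]
      · have hs : pvStepC (secs, cur, true) l = (secs, (cur ++ [l], true)) := by
          simp [pvStepC, h]
        rw [List.foldl_cons, hs, ih _ _ (by simp [hc])]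
        simp [gsec, h]

-- A's loop, before the first header
theorem foldl_stepC_out (ls : List String) (secs : List String) :
    pvFin (ls.foldl pvStepC (secs, [], false)) = secs ++ fsec ls := by
  induction ls with
  | nil => simp [pvFin, fsec]
  | cons l ls ih =>
      by_cases h : pvHeader l
      · have hs : pvStepC (secs, [], false) l = (secs, ([l], true)) := by
          simp [pvStepC, h]
        rw [List.foldl_cons, hs, foldl_stepC_in ls secs [l] (by simp)]
        simp [fsec, h]
      · simpa [pvStepC, h, fsec] using ih

-- fsec ignores the non-header prefix
theorem fsec_dropWhile (ls : List String) :
    fsec (ls.dropWhile (fun l => !pvHeader l)) = fsec ls := by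
  induction ls with
  | nil => rfl
  | cons l ls ih => by_cases h : pvHeader l <;> simp [fsec, h, ih]

-- gsec in terms of takeWhile/dropWhile
theorem gsec_eq (ls : List String) (cur : List String) :
    gsec cur ls =
      PySem.Str.join "\n" (cur ++ ls.takeWhile (fun l => !pvHeader l)) ::
        fsec (ls.dropWhile (fun l => !pvHeader l)) := by
  induction ls generalizing cur with
  | nil => simp [gsec, fsec]
  | cons l ls ih =>
      by_cases h : pvHeader l
      · simp [gsec, fsec, h]
      · simp [gsec, h, ih (cur ++ [l])]

-- B's reverse sweep produces (fsec, the non-header prefix)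
theorem foldr_stepB_eq (ls : List String) :
    ls.foldr pvStepB ([], []) = (fsec ls, ls.takeWhile (fun l => !pvHeader l)) := by
  induction ls with
  | nil => rfl
  | cons l ls ih =>
      rw [List.foldr_cons, ih]
      by_cases h : pvHeader l
      · simp [pvStepB, h, fsec, gsec_eq, fsec_dropWhile]
      · simp [pvStepB, h, fsec]

-- ===== VERDICT (by name: the statement is the Claim_ definition above) =====
theorem split_into_scene_sections_py_spec : Claim_equal_split_into_scene_sections_py := by
  intro md _
  show split_into_scene_sections_py md = split_into_scene_sections_py_alt md
  unfold split_into_scene_sections_py split_into_scene_sections_py_alt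
  simp only [foldl_stepA_eq, foldl_stepC_out, foldr_stepB_eq, List.nil_append]
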